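-- pv_equiv track=rewrite | github.com/Atxx737/WAF-CNN | filterPayload.py | setLabel
-- ===== SOURCE A (Python) =====
-- def setLabel(item):
--     anomaly_detect = ["Set-cookie", "SCRIPT","alert","EXEC","cmd","CMD","--","waitfor+delay","OR+1%3D1","%27+OR+%271%27%3D%271"
--                 "sessionid","document.location","passwd","etc","SELECT","WHERE","FROM","DROP","DELETE",
--                   "scrIPT","SCRipt","include+file","javascript","%221%22%3D%221","%27+AND+%271%27%3D%271",
--                   "AND+1%3D1","USERS","%27INJECTED_PARAM","AND+1%3D1","background","javascript","%252B",
--                   "%22%3E%3C%21--%23EXEC+cmd%3D%22dir+%22--%3E%3C","%27OR%27a%3D%27a","%2540%253CSCRipt%253Ealert%2528",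
--                   "%2529%253C%252FscrIPT%253E","%22%3E%3C%21--%23EXEC+cmd%3D%22dir+%22--%3E%3C","%3C%21--%23include+file%3D%22","%22+--%3E"
--                   "%40%3CSCRipt%3E","%2522%2Bstyle%253D%2522background%253Aurl%2528javascript%253Aalert%2528%2527","%3C%21--%23EXEC+cmd%3D%22ls+%2F%22--%3E"
--                 ]
--
--     if(len(item) <= 4):
--         if(item.startswith("%")):
--             label=1
--         else:
--             label = 0
--     else:
--         for i in anomaly_detect:
--             # if item.find(i) > 0:
--             # if search(i,item):
--             # if item.count(i) ==1:
--             if i in item: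
--             # if any(x in item for x in anomaly_detect):
--                 label = 1
--                 break
--             else:
--                 label = 0
--     return label
-- ===== SOURCE B (Python) =====
-- # Multi-pattern matching via a first-character index: bucket the patterns by their
-- # leading character once, then make a single left-to-right pass over the payload,
-- # testing at each position only the patterns that could possibly start there.
-- _ANOMALY = ["Set-cookie", "SCRIPT","alert","EXEC","cmd","CMD","--","waitfor+delay","OR+1%3D1","%27+OR+%271%27%3D%271"
--                 "sessionid","document.location","passwd","etc","SELECT","WHERE","FROM","DROP","DELETE",
--                   "scrIPT","SCRipt","include+file","javascript","%221%22%3D%221","%27+AND+%271%27%3D%271",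
--                   "AND+1%3D1","USERS","%27INJECTED_PARAM","AND+1%3D1","background","javascript","%252B",
--                   "%22%3E%3C%21--%23EXEC+cmd%3D%22dir+%22--%3E%3C","%27OR%27a%3D%27a","%2540%253CSCRipt%253Ealert%2528",
--                   "%2529%253C%252FscrIPT%253E","%22%3E%3C%21--%23EXEC+cmd%3D%22dir+%22--%3E%3C","%3C%21--%23include+file%3D%22","%22+--%3E"
--                 "%40%3CSCRipt%3E","%2522%2Bstyle%253D%2522background%253Aurl%2528javascript%253Aalert%2528%2527","%3C%21--%23EXEC+cmd%3D%22ls+%2F%22--%3E"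
--                 ]
--
-- _BY_FIRST = {}
-- for _p in _ANOMALY:
--     _BY_FIRST.setdefault(_p[0], []).append(_p)
--
-- def setLabel(item):
--     if len(item) <= 4:
--         return 1 if item.startswith("%") else 0
--     for j, c in enumerate(item):
--         for p in _BY_FIRST.get(c, ()):
--             if item.startswith(p, j):
--                 return 1
--     return 0
-- ===== Notes on version B (the rewrite author's own statement) =====
-- stated objective: alternative
-- what changed: B replaces the per-pattern full substring search with a first-character index: the patterns are bucketed by leading character into a dict built once, and the payload is scanned left to right, testing at each position only the bucket of patterns that can start there.
import Mathlib
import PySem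

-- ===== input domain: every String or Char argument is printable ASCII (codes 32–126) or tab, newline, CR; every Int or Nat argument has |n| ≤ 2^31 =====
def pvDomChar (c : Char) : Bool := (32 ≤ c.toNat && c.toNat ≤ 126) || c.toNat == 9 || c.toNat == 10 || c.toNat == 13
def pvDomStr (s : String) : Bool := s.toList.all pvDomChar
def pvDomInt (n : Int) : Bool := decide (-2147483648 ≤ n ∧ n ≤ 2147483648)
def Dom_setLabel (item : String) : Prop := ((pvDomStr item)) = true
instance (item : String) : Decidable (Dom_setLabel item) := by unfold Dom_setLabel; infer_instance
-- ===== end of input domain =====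

-- B replaces the per-pattern substring search with a first-character index (a dict of
-- pattern buckets keyed by leading character) and one left-to-right scan of the payload;
-- objective: alternative, same result. The pattern list is the identical literal in both
-- Python files (including the entries accidentally concatenated by missing commas).
def anomaly_detect : List String := ["Set-cookie", "SCRIPT", "alert", "EXEC", "cmd", "CMD", "--", "waitfor+delay", "OR+1%3D1", "%27+OR+%271%27%3D%271sessionid", "document.location", "passwd", "etc", "SELECT", "WHERE", "FROM", "DROP", "DELETE", "scrIPT", "SCRipt", "include+file", "javascript", "%221%22%3D%221", "%27+AND+%271%27%3D%271", "AND+1%3D1", "USERS", "%27INJECTED_PARAM", "AND+1%3D1", "background", "javascript", "%252B", "%22%3E%3C%21--%23EXEC+cmd%3D%22dir+%22--%3E%3C", "%27OR%27a%3D%27a", "%2540%253CSCRipt%253Ealert%2528", "%2529%253C%252FscrIPT%253E", "%22%3E%3C%21--%23EXEC+cmd%3D%22dir+%22--%3E%3C", "%3C%21--%23include+file%3D%22", "%22+--%3E%40%3CSCRipt%3E", "%2522%2Bstyle%253D%2522background%253Aurl%2528javascript%253Aalert%2528%2527", "%3C%21--%23EXEC+cmd%3D%22ls+%2F%22--%3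E"]

-- ===== PORT A =====
-- for i in anomaly_detect: if i in item: label = 1; break; else: label = 0
def setLabelLoop (item : String) : List String → Int
  | [] => 0
  | i :: rest => if PySem.Str.isIn i item then 1 else setLabelLoop item rest

def setLabel (item : String) : Int :=
  if PySem.Str.len item ≤ 4 then
    if PySem.Str.startswith item "%" then 1 else 0
  else
    setLabelLoop item anomaly_detect

-- ===== PORT B =====
-- _p[0]: every pattern is nonempty, so the getD default is never read
def keyOf (p : String) : Char := (PySem.Str.pyGet? p 0).getD ' '

-- for _p in _ANOMALY: _BY_FIRST.setdefault(_p[0], []).append(_p)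
-- (setdefault-then-append is exactly Dict.modify with default [])
def byFirst : PySem.Dict Char (List String) :=
  anomaly_detect.foldl (fun d p => d.modify (keyOf p) [] (· ++ [p])) PySem.Dict.empty

-- for j, c in enumerate(item): for p in _BY_FIRST.get(c, ()): if item.startswith(p, j): return 1
-- The j-th iteration looks at the j-th suffix c :: rest of the payload;
-- item.startswith(p, j) is exactly "p is a prefix of that suffix".
def scanB : List Char → Int
  | [] => 0
  | c :: rest =>
      if (byFirst.getD c []).any (fun p => p.toList.isPrefixOf (c :: rest)) then 1
      else scanB rest

def setLabel_alt (item : String) : Int :=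
  if PySem.Str.len item ≤ 4 then
    if PySem.Str.startswith item "%" then 1 else 0
  else
    scanB item.toList

-- ===== PRECONDITION & SPEC =====
def Spec_setLabel (item : String) (out : Int) : Prop := out = setLabel_alt item
instance (item : String) (out : Int) : Decidable (Spec_setLabel item out) := by unfold Spec_setLabel; infer_instance

-- ===== CLAIM (what is proved, stated in full; the proofs are below) =====
def Claim_equal_setLabel : Prop := ∀ (item : String), Dom_setLabel item → Spec_setLabel item (setLabel item)

-- ===== LEMMAS AND PROOFS =====

-- A's loop returns 1 iff some pattern is an infix of the payload.
theorem setLabelLoop_eq (item : String) (pats : List String) :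
    setLabelLoop item pats =
      if ∃ p ∈ pats, p.toList <:+: item.toList then 1 else 0 := by
  induction pats with
  | nil => simp [setLabelLoop]
  | cons i rest ih =>
      simp only [setLabelLoop, ih]
      by_cases h : i.toList <:+: item.toList
      · have hb : PySem.Chars.isIn i.toList item.toList = true :=
          (PySem.Chars.isIn_iff_infix _ _).mpr h
        have hex : ∃ p ∈ i :: rest, p.toList <:+: item.toList :=
          ⟨i, List.mem_cons_self, h⟩
        rw [if_pos hex]
        simp [hb]
      · have hb : PySem.Str.isIn i item = false := by
          simp only [PySem.Str.isIn_eq]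
          cases hc : PySem.Chars.isIn i.toList item.toList
          · rfl
          · exact absurd ((PySem.Chars.isIn_iff_infix _ _).mp hc) h
        rw [hb]
        simp only [Bool.false_eq_true, if_false]
        congr 1
        simp only [eq_iff_iff, List.mem_cons]
        constructor
        · rintro ⟨p, hp, hinf⟩; exact ⟨p, Or.inr hp, hinf⟩
        · rintro ⟨p, hp | hp, hinf⟩
          · exact absurd (hp ▸ hinf) h
          · exact ⟨p, hp, hinf⟩

-- The bucket of a character holds exactly the patterns whose first character it is.
theorem getD_byFirst (c : Char) :
    byFirst.getD c [] = anomaly_detect.filter (fun p => keyOf p == c) := by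
  have h1 : byFirst =
      (anomaly_detect.map (fun p => (keyOf p, p))).foldl
        (fun d q => d.modify q.1 [] (· ++ [q.2])) PySem.Dict.empty := by
    rw [List.foldl_map]
    rfl
  rw [h1, PySem.Dict.getD_foldl_modify_append]
  simp [List.filter_map, List.map_map, Function.comp_def]

-- Every pattern is nonempty.
theorem anomaly_ne_nil : ∀ p ∈ anomaly_detect, p.toList ≠ [] := by decide

-- A nonempty pattern prefixing the suffix c :: rest has first character c.
theorem keyOf_of_prefix {p : String} {c : Char} {rest : List Char}
    (hne : p.toList ≠ []) (hpre : p.toList.isPrefixOf (c :: rest) = true) :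
    keyOf p = c := by
  rcases hl : p.toList with _ | ⟨d, t⟩
  · exact absurd hl hne
  · have := List.isPrefixOf_iff_prefix.mp (hl ▸ hpre)
    rcases this with ⟨s, hs⟩
    have hd : d = c := by
      have := congrArg (List.head? ·) hs
      simpa using this
    simp [keyOf, PySem.Str.pyGet?, PySem.Chars.pyGet?, PySem.List.pyGet?, PySem.List.pyIdx?, hl, hd]

-- B's bucketed scan returns 1 iff some pattern is an infix of the payload.
theorem scanB_eq (s : List Char) :
    scanB s = if ∃ p ∈ anomaly_detect, p.toList <:+: s then 1 else 0 := by
  induction s with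
  | nil =>
      simp only [scanB]
      rw [if_neg]
      rintro ⟨p, hp, hinf⟩
      exact anomaly_ne_nil p hp (List.eq_nil_of_infix_nil hinf)
  | cons c rest ih =>
      simp only [scanB, ih]
      by_cases h : (byFirst.getD c []).any (fun p => p.toList.isPrefixOf (c :: rest)) = true
      · obtain ⟨p, hp, hpre⟩ := List.any_eq_true.mp h
        rw [getD_byFirst] at hp
        have hex : ∃ q ∈ anomaly_detect, q.toList <:+: c :: rest :=
          ⟨p, List.mem_of_mem_filter hp, (List.isPrefixOf_iff_prefix.mp hpre).isInfix⟩
        simp [h, hex]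
      · have hnp : ∀ p ∈ anomaly_detect, ¬ p.toList <+: (c :: rest) := by
          intro p hp hpre
          apply h
          refine List.any_eq_true.mpr ⟨p, ?_, List.isPrefixOf_iff_prefix.mpr hpre⟩
          rw [getD_byFirst]
          refine List.mem_filter.mpr ⟨hp, ?_⟩
          have := keyOf_of_prefix (anomaly_ne_nil p hp) (List.isPrefixOf_iff_prefix.mpr hpre)
          simp [this]
        simp only [h, Bool.false_eq_true, if_false]
        congr 1
        simp only [eq_iff_iff]
        constructor
        · rintro ⟨p, hp, hinf⟩
          exact ⟨p, hp, hinf.trans (List.suffix_cons c rest).isInfix⟩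
        · rintro ⟨p, hp, hinf⟩
          rcases List.infix_cons_iff.mp hinf with hpre | hinf'
          · exact absurd hpre (hnp p hp)
          · exact ⟨p, hp, hinf'⟩

-- ===== VERDICT (by name: the statement is the Claim_ definition above) =====
theorem setLabel_spec : Claim_equal_setLabel := by
  intro item _
  unfold Spec_setLabel setLabel setLabel_alt
  split
  · rfl
  · rw [setLabelLoop_eq, scanB_eq]
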